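-- pv_equiv track=rewrite | github.com/jtba/Sensebase | src/extractors/repo_prep.py | _extract_member_signatures
-- ===== SOURCE A (Python) =====
-- def _extract_member_signatures(
--
--     lines: list[str],
--     start: int,
--     result: list[str],
--     language: str,
-- ) -> int:
--     """Extract method/field signatures from inside a class/struct body.
--
--     Reads lines starting at *start* (which should be just after the
--     opening ``{`` of the type declaration).  Returns the index after
--     the matching closing ``}``.
--     """
--     brace_depth = 1
--     i = start
--
--     while i < len(lines) and brace_depth > 0:
--         line = lines[i]
--         stripped = line.lstrip()
--
--         # Track braces
--         open_braces = line.count("{")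
--         close_braces = line.count("}")
--
--         # Closing brace at depth 1 means end of class
--         if brace_depth == 1 and stripped.startswith("}"):
--             result.append(line)
--             brace_depth -= close_braces
--             brace_depth += open_braces
--             i += 1
--             continue
--
--         if brace_depth == 1:
--             # Annotations
--             if stripped.startswith("@") or stripped.startswith("#["):
--                 result.append(line)
--                 i += 1
--                 continue
--
--             # Comments
--             if stripped.startswith("//") or stripped.startswith("#"):
--                 result.append(line)
--                 i += 1
--                 continue
--
--             # Block comments
--             if stripped.startswith("/**") or stripped.startswith("/*"):
--                 while i < len(lines):
--                     result.append(lines[i])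
--                     if "*/" in lines[i]:
--                         i += 1
--                         break
--                     i += 1
--                 continue
--
--             # Method/function signatures or field declarations
--             if open_braces > 0:
--                 # This line opens a new block -- keep as signature, skip body
--                 result.append(line)
--                 indent = len(line) - len(stripped)
--                 result.append(f"{' ' * (indent + 2)}// ...")
--                 # Skip past the body
--                 inner_depth = open_braces - close_braces
--                 i += 1
--                 while i < len(lines) and inner_depth > 0:
--                     inner_depth += lines[i].count("{") - lines[i].count("}")
--                     i += 1
--                 # Add closing brace line if we stopped right after it
--                 continue
--             else:
--                 # Field declaration or single-line statement
--                 result.append(line)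
--                 i += 1
--                 continue
--         else:
--             # We're inside a nested block -- skip
--             brace_depth += open_braces - close_braces
--             i += 1
--
--     return i
-- ===== SOURCE B (Python) =====
-- def _extract_member_signatures(
--     lines: list[str],
--     start: int,
--     result: list[str],
--     language: str,
-- ) -> int:
--     """Two staged passes: first tabulate a per-line record (kind, brace
--     delta, comment terminator, elision placeholder), then run one flat
--     state machine over the table with a single depth counter.
--     """
--     CLOSE, PASS, COMMENT, OPENS, FIELD = range(5)
--
--     # Pass 1: classify every line once; no string work happens later.
--     table = []
--     for line in lines:
--         stripped = line.lstrip()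
--         if stripped.startswith("}"):
--             kind = CLOSE
--         elif stripped.startswith(("@", "#", "//")):
--             kind = PASS
--         elif stripped.startswith("/*"):
--             kind = COMMENT
--         elif "{" in line:
--             kind = OPENS
--         else:
--             kind = FIELD
--         table.append((kind,
--                       line.count("{") - line.count("}"),
--                       "*/" in line,
--                       " " * (len(line) - len(stripped) + 2) + "// ...",
--                       line))
--
--     # Pass 2: flat state machine.
--     # mode 0 = class level; 1 = skipping a method body; 2 = nested block
--     # entered through an unbalanced closing line; 3 = inside a block comment.
--     n = len(lines)
--     i = start
--     mode = 0
--     d = 0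
--     while i < n:
--         kind, delta, has_end, holder, line = table[i]
--         i += 1
--         if mode == 1:
--             d += delta
--             if d <= 0:
--                 mode = 0
--         elif mode == 2:
--             d += delta
--             if d <= 0:
--                 return i
--             if d == 1:
--                 mode = 0
--         elif mode == 3:
--             result.append(line)
--             if has_end:
--                 mode = 0
--         elif kind == CLOSE:
--             result.append(line)
--             d = 1 + delta
--             if d <= 0:
--                 return i
--             if d != 1:
--                 mode = 2
--         elif kind == PASS:
--             result.append(line)
--         elif kind == COMMENT:
--             result.append(line)
--             if not has_end:
--                 mode = 3
--         elif kind == OPENS: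
--             result.append(line)
--             result.append(holder)
--             d = delta
--             if d > 0:
--                 mode = 1
--         else:
--             result.append(line)
--     return i
-- ===== Notes on version B (the rewrite author's own statement) =====
-- stated objective: alternative
-- what changed: A's outer while with two nested inner while-loops (method-body skip, block-comment copy) and a depth-1 branch ladder re-running lstrip/startswith/count per visit is replaced by two staged passes: a first pass tabulates one record per line (kind, brace delta, '*/' flag, placeholder), then a flat four-state machine with a single depth counter scans the table with no string work at all.
import Mathlib
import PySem

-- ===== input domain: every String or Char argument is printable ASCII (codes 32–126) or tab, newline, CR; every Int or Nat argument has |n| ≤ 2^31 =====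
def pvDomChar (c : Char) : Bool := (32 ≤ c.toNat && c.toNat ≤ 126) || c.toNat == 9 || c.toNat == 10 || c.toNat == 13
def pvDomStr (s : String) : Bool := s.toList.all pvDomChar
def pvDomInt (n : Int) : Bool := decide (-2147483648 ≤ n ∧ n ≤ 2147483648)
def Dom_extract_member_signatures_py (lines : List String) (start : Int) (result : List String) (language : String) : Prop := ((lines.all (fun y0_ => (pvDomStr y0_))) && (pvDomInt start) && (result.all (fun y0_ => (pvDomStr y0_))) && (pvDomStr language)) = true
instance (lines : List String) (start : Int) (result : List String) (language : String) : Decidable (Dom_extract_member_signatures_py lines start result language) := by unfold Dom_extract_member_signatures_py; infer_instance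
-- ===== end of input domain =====

-- B replaces A's nested while-loops by two staged passes — a per-line classification
-- table built once, then a flat four-state scan of the table (objective: alternative);
-- in Python both mutate `result` identically, the theorem is about the returned index.
-- (The `fuel` argument of each loop is only the standard totality device: it starts at
-- (len(lines) - start).toNat, an upper bound on the number of iterations, since every
-- iteration of every loop advances i by exactly 1.)

-- ===== PORT A =====
-- open/close brace counts of a line, as Python ints
def pvA_ob (line : String) : Int := (PySem.Str.count line "{" : Int)
def pvA_cb (line : String) : Int := (PySem.Str.count line "}" : Int)
-- f"{' ' * (indent + 2)}// ..." for the given line and its lstripped form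
def pvA_dots (line stripped : String) : String :=
  String.ofList (List.replicate (PySem.Str.len line - PySem.Str.len stripped + 2).toNat ' ' ++ "// ...".toList)

-- the inner `while i < len(lines) and inner_depth > 0` body-skipping loop
def pvA_skipBody (lines : List String) : Nat → Int → Int → Int
  | 0, i, _ => i
  | fuel + 1, i, d =>
    if i < (lines.length : Int) ∧ 0 < d then
      pvA_skipBody lines fuel (i + 1)
        (d + pvA_ob (PySem.List.pyGetD lines i "") - pvA_cb (PySem.List.pyGetD lines i ""))
    else i

-- the block-comment copying loop; returns (new i, new result)
def pvA_comment (lines : List String) : Nat → Int → List String → Int × List String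
  | 0, i, result => (i, result)
  | fuel + 1, i, result =>
    if i < (lines.length : Int) then
      if PySem.Str.isIn "*/" (PySem.List.pyGetD lines i "") then
        (i + 1, result ++ [PySem.List.pyGetD lines i ""])
      else pvA_comment lines fuel (i + 1) (result ++ [PySem.List.pyGetD lines i ""])
    else (i, result)

-- the outer `while i < len(lines) and brace_depth > 0` loop of A, branch for branch
def pvA_go (lines : List String) : Nat → Int → List String → Int → Int
  | 0, i, _, _ => i
  | fuel + 1, i, result, depth =>
    if i < (lines.length : Int) ∧ 0 < depth then
      if depth = 1 ∧ PySem.Str.startswith (PySem.Str.lstrip (PySem.List.pyGetD lines i "")) "}" = true then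
        pvA_go lines fuel (i + 1) (result ++ [PySem.List.pyGetD lines i ""])
          (depth - pvA_cb (PySem.List.pyGetD lines i "") + pvA_ob (PySem.List.pyGetD lines i ""))
      else if depth = 1 then
        if PySem.Str.startswith (PySem.Str.lstrip (PySem.List.pyGetD lines i "")) "@" = true ∨
           PySem.Str.startswith (PySem.Str.lstrip (PySem.List.pyGetD lines i "")) "#[" = true then
          pvA_go lines fuel (i + 1) (result ++ [PySem.List.pyGetD lines i ""]) depth
        else if PySem.Str.startswith (PySem.Str.lstrip (PySem.List.pyGetD lines i "")) "//" = true ∨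
                PySem.Str.startswith (PySem.Str.lstrip (PySem.List.pyGetD lines i "")) "#" = true then
          pvA_go lines fuel (i + 1) (result ++ [PySem.List.pyGetD lines i ""]) depth
        else if PySem.Str.startswith (PySem.Str.lstrip (PySem.List.pyGetD lines i "")) "/**" = true ∨
                PySem.Str.startswith (PySem.Str.lstrip (PySem.List.pyGetD lines i "")) "/*" = true then
          pvA_go lines fuel (pvA_comment lines (fuel + 1) i result).1 (pvA_comment lines (fuel + 1) i result).2 depth
        else if 0 < pvA_ob (PySem.List.pyGetD lines i "") then
          pvA_go lines fuel
            (pvA_skipBody lines fuel (i + 1)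
              (pvA_ob (PySem.List.pyGetD lines i "") - pvA_cb (PySem.List.pyGetD lines i "")))
            (result ++ [PySem.List.pyGetD lines i "",
              pvA_dots (PySem.List.pyGetD lines i "") (PySem.Str.lstrip (PySem.List.pyGetD lines i ""))]) depth
        else
          pvA_go lines fuel (i + 1) (result ++ [PySem.List.pyGetD lines i ""]) depth
      else
        pvA_go lines fuel (i + 1) result
          (depth + pvA_ob (PySem.List.pyGetD lines i "") - pvA_cb (PySem.List.pyGetD lines i ""))
    else i

def extract_member_signatures_py (lines : List String) (start : Int) (result : List String) (language : String) : Int :=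
  pvA_go lines ((lines.length : Int) - start).toNat start result 1

-- ===== PORT B =====
-- one record of B's table: kind (0 close / 1 pass / 2 block comment / 3 opens /
-- 4 field), net brace delta, "*/" flag, elision placeholder, and the line itself
structure PVInfo where
  kind   : Int
  delta  : Int
  hasEnd : Bool
  holder : String
  line   : String
deriving DecidableEq, Repr

-- pass 1 of Source B, for one line
def pvB_classify (line : String) : PVInfo :=
  let stripped := PySem.Str.lstrip line
  { kind :=
      if PySem.Str.startswith stripped "}" then 0
      else if PySem.Str.startswith stripped "@" || PySem.Str.startswith stripped "#" ||
              PySem.Str.startswith stripped "//" then 1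
      else if PySem.Str.startswith stripped "/*" then 2
      else if 0 < PySem.Str.count line "{" then 3
      else 4,
    delta := (PySem.Str.count line "{" : Int) - (PySem.Str.count line "}" : Int),
    hasEnd := PySem.Str.isIn "*/" line,
    holder := String.ofList
      (List.replicate (PySem.Str.len line - PySem.Str.len stripped + 2).toNat ' ' ++ "// ...".toList),
    line := line }

-- pass 2 of Source B: the flat state machine over the table
-- (mode 0 = class level, 1 = skipping a method body, 2 = nested block entered
-- through an unbalanced closing line, 3 = inside a block comment)
def pvB_run (table : List PVInfo) : Nat → Int → List String → Int → Int → Int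
  | 0, i, _, _, _ => i
  | fuel + 1, i, result, mode, d =>
    if i < (table.length : Int) then
      let r := PySem.List.pyGetD table i (pvB_classify "")
      if mode = 1 then
        if d + r.delta ≤ 0 then pvB_run table fuel (i + 1) result 0 (d + r.delta)
        else pvB_run table fuel (i + 1) result 1 (d + r.delta)
      else if mode = 2 then
        if d + r.delta ≤ 0 then i + 1
        else if d + r.delta = 1 then pvB_run table fuel (i + 1) result 0 (d + r.delta)
        else pvB_run table fuel (i + 1) result 2 (d + r.delta)
      else if mode = 3 then
        if r.hasEnd then pvB_run table fuel (i + 1) (result ++ [r.line]) 0 d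
        else pvB_run table fuel (i + 1) (result ++ [r.line]) 3 d
      else if r.kind = 0 then
        if 1 + r.delta ≤ 0 then i + 1
        else if 1 + r.delta ≠ 1 then
          pvB_run table fuel (i + 1) (result ++ [r.line]) 2 (1 + r.delta)
        else pvB_run table fuel (i + 1) (result ++ [r.line]) 0 (1 + r.delta)
      else if r.kind = 1 then pvB_run table fuel (i + 1) (result ++ [r.line]) 0 d
      else if r.kind = 2 then
        if !r.hasEnd then pvB_run table fuel (i + 1) (result ++ [r.line]) 3 d
        else pvB_run table fuel (i + 1) (result ++ [r.line]) 0 d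
      else if r.kind = 3 then
        if 0 < r.delta then
          pvB_run table fuel (i + 1) (result ++ [r.line, r.holder]) 1 r.delta
        else pvB_run table fuel (i + 1) (result ++ [r.line, r.holder]) 0 r.delta
      else pvB_run table fuel (i + 1) (result ++ [r.line]) 0 d
    else i

def extract_member_signatures_py_alt (lines : List String) (start : Int) (result : List String) (language : String) : Int :=
  pvB_run (lines.map pvB_classify) ((lines.length : Int) - start).toNat start result 0 0

-- ===== PRECONDITION & SPEC =====
-- Pre_ excludes exactly the inputs where the Python A raises IndexError: start < -len(lines)
-- (negative indexing past the front of `lines`).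
def Pre_extract_member_signatures_py (lines : List String) (start : Int) (result : List String) (language : String) : Prop :=
  -(lines.length : Int) ≤ start
instance (lines : List String) (start : Int) (result : List String) (language : String) : Decidable (Pre_extract_member_signatures_py lines start result language) := by unfold Pre_extract_member_signatures_py; infer_instance

def pvWitness_extract_member_signatures_py : List String × Int × List String × String :=
  (["  int x;", "}"], 0, [], "java")

def Spec_extract_member_signatures_py (lines : List String) (start : Int) (result : List String) (language : String) (out : Int) : Prop := out = extract_member_signatures_py_alt lines start result language
instance (lines : List String) (start : Int) (result : List String) (language : String) (out : Int) : Decidable (Spec_extract_member_signatures_py lines start result language out) := by unfold Spec_extract_member_signatures_py; infer_instance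

-- ===== CLAIM (what is proved, stated in full; the proofs are below) =====
def Claim_equal_extract_member_signatures_py : Prop := ∀ (lines : List String) (start : Int) (result : List String) (language : String), Dom_extract_member_signatures_py lines start result language → Pre_extract_member_signatures_py lines start result language → Spec_extract_member_signatures_py lines start result language (extract_member_signatures_py lines start result language)

-- ===== LEMMAS AND PROOFS =====

-- projections of a classified line, phrased through A's helpers
theorem pvB_delta_eq (L : String) : (pvB_classify L).delta = pvA_ob L - pvA_cb L := rfl
theorem pvB_hasEnd_eq (L : String) : (pvB_classify L).hasEnd = PySem.Str.isIn "*/" L := rfl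
theorem pvB_holder_eq (L : String) : (pvB_classify L).holder = pvA_dots L (PySem.Str.lstrip L) := rfl
theorem pvB_line_eq (L : String) : (pvB_classify L).line = L := rfl

-- indexing the table is classifying the indexed line
theorem pvB_get (lines : List String) (i : Int) :
    PySem.List.pyGetD (lines.map pvB_classify) i (pvB_classify "")
      = pvB_classify (PySem.List.pyGetD lines i "") :=
  PySem.List.pyGetD_map pvB_classify lines i ""

-- once i is past the end, every loop returns i whatever its fuel
theorem pvA_go_stop (lines : List String) (n : Nat) (i : Int) (result : List String) (depth : Int)
    (h : ¬ (i < (lines.length : Int) ∧ 0 < depth)) : pvA_go lines n i result depth = i := by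
  cases n with
  | zero => rfl
  | succ n => exact if_neg h

theorem pvA_go_of_nonpos (lines : List String) (n : Nat) (i : Int) (result : List String) (depth : Int)
    (h : depth ≤ 0) : pvA_go lines n i result depth = i :=
  pvA_go_stop lines n i result depth (by omega)

theorem pvB_run_stop (lines : List String) (n : Nat) (i : Int) (result : List String) (mode d : Int)
    (h : ¬ i < (lines.length : Int)) : pvB_run (lines.map pvB_classify) n i result mode d = i := by
  cases n with
  | zero => rfl
  | succ n => exact if_neg (by simpa using h)

theorem pvA_comment_stop (lines : List String) (n : Nat) (i : Int) (result : List String)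
    (h : ¬ i < (lines.length : Int)) : pvA_comment lines n i result = (i, result) := by
  cases n with
  | zero => rfl
  | succ n => exact if_neg h

theorem pvA_skipBody_stop (lines : List String) (n : Nat) (i : Int) (d : Int)
    (h : ¬ (i < (lines.length : Int) ∧ 0 < d)) : pvA_skipBody lines n i d = i := by
  cases n with
  | zero => rfl
  | succ n => exact if_neg h

-- "#[" starts the line ⇒ "#" does; "/**" ⇒ "/*"
theorem pvsw_hash (s : String) (h : PySem.Str.startswith s "#[" = true) :
    PySem.Str.startswith s "#" = true := by
  simp only [PySem.Str.startswith_eq, PySem.Chars.startswith_iff] at h ⊢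
  exact List.IsPrefix.trans (by decide) h

theorem pvsw_star (s : String) (h : PySem.Str.startswith s "/**" = true) :
    PySem.Str.startswith s "/*" = true := by
  simp only [PySem.Str.startswith_eq, PySem.Chars.startswith_iff] at h ⊢
  exact List.IsPrefix.trans (by decide) h

-- the kind of a line, in each of the five classification cases
theorem pvB_kind0 (L : String) (h : PySem.Str.startswith (PySem.Str.lstrip L) "}" = true) :
    (pvB_classify L).kind = 0 := by
  simp only [pvB_classify]; simp_all

theorem pvB_kind1 (L : String) (h0 : ¬ PySem.Str.startswith (PySem.Str.lstrip L) "}" = true)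
    (h1 : (PySem.Str.startswith (PySem.Str.lstrip L) "@" ||
           PySem.Str.startswith (PySem.Str.lstrip L) "#" ||
           PySem.Str.startswith (PySem.Str.lstrip L) "//") = true) :
    (pvB_classify L).kind = 1 := by
  simp only [pvB_classify]; simp_all

theorem pvB_kind2 (L : String) (h0 : ¬ PySem.Str.startswith (PySem.Str.lstrip L) "}" = true)
    (h1 : ¬ (PySem.Str.startswith (PySem.Str.lstrip L) "@" ||
             PySem.Str.startswith (PySem.Str.lstrip L) "#" ||
             PySem.Str.startswith (PySem.Str.lstrip L) "//") = true)
    (h2 : PySem.Str.startswith (PySem.Str.lstrip L) "/*" = true) :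
    (pvB_classify L).kind = 2 := by
  simp only [pvB_classify]; simp_all

theorem pvB_kind3 (L : String) (h0 : ¬ PySem.Str.startswith (PySem.Str.lstrip L) "}" = true)
    (h1 : ¬ (PySem.Str.startswith (PySem.Str.lstrip L) "@" ||
             PySem.Str.startswith (PySem.Str.lstrip L) "#" ||
             PySem.Str.startswith (PySem.Str.lstrip L) "//") = true)
    (h2 : ¬ PySem.Str.startswith (PySem.Str.lstrip L) "/*" = true)
    (h3 : 0 < PySem.Str.count L "{") :
    (pvB_classify L).kind = 3 := by
  simp only [pvB_classify]; simp_all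

theorem pvB_kind4 (L : String) (h0 : ¬ PySem.Str.startswith (PySem.Str.lstrip L) "}" = true)
    (h1 : ¬ (PySem.Str.startswith (PySem.Str.lstrip L) "@" ||
             PySem.Str.startswith (PySem.Str.lstrip L) "#" ||
             PySem.Str.startswith (PySem.Str.lstrip L) "//") = true)
    (h2 : ¬ PySem.Str.startswith (PySem.Str.lstrip L) "/*" = true)
    (h3 : ¬ 0 < PySem.Str.count L "{") :
    (pvB_classify L).kind = 4 := by
  simp only [pvB_classify]; simp_all

-- the four simulation invariants: A at class level / in a nested block / in a block
-- comment / skipping a method body correspond to B's modes 0 / 2 / 3 / 1, for any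
-- sufficient fuels; the induction is on the bound k ≥ len - i
set_option maxHeartbeats 3200000 in
theorem pvMain (lines : List String) : ∀ (k : Nat) (i : Int), (lines.length : Int) ≤ i + k →
    ∀ result : List String,
    (∀ (nA nB : Nat) (d : Int), (lines.length : Int) ≤ i + nA → (lines.length : Int) ≤ i + nB →
      pvA_go lines nA i result 1 = pvB_run (lines.map pvB_classify) nB i result 0 d) ∧
    (∀ (nA nB : Nat) (depth : Int), 2 ≤ depth → (lines.length : Int) ≤ i + nA → (lines.length : Int) ≤ i + nB →
      pvA_go lines nA i result depth = pvB_run (lines.map pvB_classify) nB i result 2 depth) ∧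
    (∀ (nA nC nB : Nat) (d : Int), (lines.length : Int) ≤ i + nA → (lines.length : Int) ≤ i + nC → (lines.length : Int) ≤ i + nB →
      pvA_go lines nA (pvA_comment lines nC i result).1 (pvA_comment lines nC i result).2 1
        = pvB_run (lines.map pvB_classify) nB i result 3 d) ∧
    (∀ (nA nS nB : Nat) (d : Int), 0 < d → (lines.length : Int) ≤ i + nA → (lines.length : Int) ≤ i + nS → (lines.length : Int) ≤ i + nB →
      pvA_go lines nA (pvA_skipBody lines nS i d) result 1 = pvB_run (lines.map pvB_classify) nB i result 1 d) := by
  intro k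
  induction k with
  | zero =>
    intro i hi result
    have hni : ¬ i < (lines.length : Int) := by omega
    refine ⟨fun nA nB d _ _ => ?_, fun nA nB depth _ _ _ => ?_, fun nA nC nB d _ _ _ => ?_,
            fun nA nS nB d _ _ _ _ => ?_⟩
    · rw [pvA_go_stop lines nA i result 1 (by omega), pvB_run_stop lines nB i result 0 d hni]
    · rw [pvA_go_stop lines nA i result depth (by omega), pvB_run_stop lines nB i result 2 depth hni]
    · rw [pvA_comment_stop lines nC i result hni,
          pvA_go_stop lines nA i result 1 (by omega), pvB_run_stop lines nB i result 3 d hni]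
    · rw [pvA_skipBody_stop lines nS i d (by omega),
          pvA_go_stop lines nA i result 1 (by omega), pvB_run_stop lines nB i result 1 d hni]
  | succ k ih =>
    intro i hi result
    by_cases hlt : i < (lines.length : Int)
    case neg =>
      refine ⟨fun nA nB d _ _ => ?_, fun nA nB depth _ _ _ => ?_, fun nA nC nB d _ _ _ => ?_,
              fun nA nS nB d _ _ _ _ => ?_⟩
      · rw [pvA_go_stop lines nA i result 1 (by omega), pvB_run_stop lines nB i result 0 d hlt]
      · rw [pvA_go_stop lines nA i result depth (by omega), pvB_run_stop lines nB i result 2 depth hlt]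
      · rw [pvA_comment_stop lines nC i result hlt,
            pvA_go_stop lines nA i result 1 (by omega), pvB_run_stop lines nB i result 3 d hlt]
      · rw [pvA_skipBody_stop lines nS i d (by omega),
            pvA_go_stop lines nA i result 1 (by omega), pvB_run_stop lines nB i result 1 d hlt]
    case pos =>
    have IH1 : ∀ r (nA nB : Nat) (d : Int), (lines.length : Int) ≤ i + 1 + nA → (lines.length : Int) ≤ i + 1 + nB →
        pvA_go lines nA (i + 1) r 1 = pvB_run (lines.map pvB_classify) nB (i + 1) r 0 d :=
      fun r nA nB d hA hB => (ih (i + 1) (by omega) r).1 nA nB d hA hB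
    have IH2 : ∀ r (nA nB : Nat) (depth : Int), 2 ≤ depth → (lines.length : Int) ≤ i + 1 + nA → (lines.length : Int) ≤ i + 1 + nB →
        pvA_go lines nA (i + 1) r depth = pvB_run (lines.map pvB_classify) nB (i + 1) r 2 depth :=
      fun r nA nB depth h2 hA hB => (ih (i + 1) (by omega) r).2.1 nA nB depth h2 hA hB
    have IH3 : ∀ r (nA nC nB : Nat) (d : Int), (lines.length : Int) ≤ i + 1 + nA → (lines.length : Int) ≤ i + 1 + nC → (lines.length : Int) ≤ i + 1 + nB →
        pvA_go lines nA (pvA_comment lines nC (i + 1) r).1 (pvA_comment lines nC (i + 1) r).2 1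
          = pvB_run (lines.map pvB_classify) nB (i + 1) r 3 d :=
      fun r nA nC nB d hA hC hB => (ih (i + 1) (by omega) r).2.2.1 nA nC nB d hA hC hB
    have IH4 : ∀ r (nA nS nB : Nat) (d : Int), 0 < d → (lines.length : Int) ≤ i + 1 + nA → (lines.length : Int) ≤ i + 1 + nS → (lines.length : Int) ≤ i + 1 + nB →
        pvA_go lines nA (pvA_skipBody lines nS (i + 1) d) r 1 = pvB_run (lines.map pvB_classify) nB (i + 1) r 1 d :=
      fun r nA nS nB d hd hA hS hB => (ih (i + 1) (by omega) r).2.2.2 nA nS nB d hd hA hS hB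
    refine ⟨fun nA nB d hnA hnB => ?_, fun nA nB depth h2 hnA hnB => ?_,
            fun nA nC nB d hnA hnC hnB => ?_, fun nA nS nB d hd hnA hnS hnB => ?_⟩
    · -- class level (depth 1) vs mode 0
      obtain ⟨nA, rfl⟩ : ∃ m, nA = m + 1 := ⟨nA - 1, by omega⟩
      obtain ⟨nB, rfl⟩ : ∃ m, nB = m + 1 := ⟨nB - 1, by omega⟩
      simp only [pvA_go, pvB_run, List.length_map, pvB_get, pvB_delta_eq, pvB_hasEnd_eq,
        pvB_holder_eq, pvB_line_eq]
      rw [if_pos (show i < (lines.length : Int) ∧ (0 : Int) < 1 from ⟨hlt, by norm_num⟩), if_pos hlt]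
      simp only [if_neg (by norm_num : ¬ (0 : Int) = 1), if_neg (by norm_num : ¬ (0 : Int) = 2),
        if_neg (by norm_num : ¬ (0 : Int) = 3), true_and, if_true]
      by_cases hbr : PySem.Str.startswith (PySem.Str.lstrip (PySem.List.pyGetD lines i "")) "}" = true
      · rw [if_pos hbr, if_pos (pvB_kind0 _ hbr)]
        by_cases hz : 1 + (pvA_ob (PySem.List.pyGetD lines i "") - pvA_cb (PySem.List.pyGetD lines i "")) ≤ 0
        · rw [if_pos hz, pvA_go_of_nonpos lines _ _ _ _ (by omega)]
        · rw [if_neg hz]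
          by_cases h1 : (1 : Int) + (pvA_ob (PySem.List.pyGetD lines i "") - pvA_cb (PySem.List.pyGetD lines i "")) = 1
          · rw [if_neg (by omega : ¬ (1 : Int) + (pvA_ob (PySem.List.pyGetD lines i "") - pvA_cb (PySem.List.pyGetD lines i "")) ≠ 1)]
            rw [(by omega : (1 : Int) - pvA_cb (PySem.List.pyGetD lines i "") + pvA_ob (PySem.List.pyGetD lines i "") = 1)]
            exact IH1 _ _ _ _ (by omega) (by omega)
          · rw [if_pos (by omega : (1 : Int) + (pvA_ob (PySem.List.pyGetD lines i "") - pvA_cb (PySem.List.pyGetD lines i "")) ≠ 1)]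
            rw [(by omega : (1 : Int) - pvA_cb (PySem.List.pyGetD lines i "") + pvA_ob (PySem.List.pyGetD lines i "") = 1 + (pvA_ob (PySem.List.pyGetD lines i "") - pvA_cb (PySem.List.pyGetD lines i "")))]
            exact IH2 _ _ _ _ (by omega) (by omega) (by omega)
      · rw [if_neg hbr]
        by_cases hpass : (PySem.Str.startswith (PySem.Str.lstrip (PySem.List.pyGetD lines i "")) "@" ||
               PySem.Str.startswith (PySem.Str.lstrip (PySem.List.pyGetD lines i "")) "#" ||
               PySem.Str.startswith (PySem.Str.lstrip (PySem.List.pyGetD lines i "")) "//") = true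
        · have hk := pvB_kind1 _ hbr hpass
          have hk0 : ¬ (pvB_classify (PySem.List.pyGetD lines i "")).kind = 0 := by omega
          rw [if_neg hk0, if_pos hk]
          rcases Bool.or_eq_true_iff.1 hpass with hp | hsl
          · rcases Bool.or_eq_true_iff.1 hp with hat | hhash
            · rw [if_pos (Or.inl hat)]; exact IH1 _ _ _ _ (by omega) (by omega)
            · by_cases hbrk : PySem.Str.startswith (PySem.Str.lstrip (PySem.List.pyGetD lines i "")) "#[" = true
              · rw [if_pos (Or.inr hbrk)]; exact IH1 _ _ _ _ (by omega) (by omega)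
              · by_cases hat : PySem.Str.startswith (PySem.Str.lstrip (PySem.List.pyGetD lines i "")) "@" = true
                · rw [if_pos (Or.inl hat)]; exact IH1 _ _ _ _ (by omega) (by omega)
                · rw [if_neg (fun hc => Or.elim hc hat hbrk), if_pos (Or.inr hhash)]
                  exact IH1 _ _ _ _ (by omega) (by omega)
          · by_cases hp1 : PySem.Str.startswith (PySem.Str.lstrip (PySem.List.pyGetD lines i "")) "@" = true ∨
                PySem.Str.startswith (PySem.Str.lstrip (PySem.List.pyGetD lines i "")) "#[" = true
            · rw [if_pos hp1]; exact IH1 _ _ _ _ (by omega) (by omega)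
            · rw [if_neg hp1, if_pos (Or.inl hsl)]; exact IH1 _ _ _ _ (by omega) (by omega)
        · have hat : ¬ PySem.Str.startswith (PySem.Str.lstrip (PySem.List.pyGetD lines i "")) "@" = true :=
            fun hc => hpass (by rw [hc]; simp only [Bool.true_or])
          have hhash : ¬ PySem.Str.startswith (PySem.Str.lstrip (PySem.List.pyGetD lines i "")) "#" = true :=
            fun hc => hpass (by rw [hc]; simp only [Bool.true_or, Bool.or_true])
          have hsl : ¬ PySem.Str.startswith (PySem.Str.lstrip (PySem.List.pyGetD lines i "")) "//" = true :=
            fun hc => hpass (by rw [hc]; simp only [Bool.or_true])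
          have hbrk : ¬ PySem.Str.startswith (PySem.Str.lstrip (PySem.List.pyGetD lines i "")) "#[" = true :=
            fun hc => hhash (pvsw_hash _ hc)
          rw [if_neg (fun hc => Or.elim hc hat hbrk), if_neg (fun hc => Or.elim hc hsl hhash)]
          by_cases hcm : PySem.Str.startswith (PySem.Str.lstrip (PySem.List.pyGetD lines i "")) "/*" = true
          · have hk := pvB_kind2 _ hbr hpass hcm
            have hk0 : ¬ (pvB_classify (PySem.List.pyGetD lines i "")).kind = 0 := by omega
            have hk1 : ¬ (pvB_classify (PySem.List.pyGetD lines i "")).kind = 1 := by omega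
            rw [if_neg hk0, if_neg hk1, if_pos hk, if_pos (Or.inr hcm)]
            simp only [pvA_comment]
            rw [if_pos hlt]
            by_cases hend : PySem.Str.isIn "*/" (PySem.List.pyGetD lines i "") = true
            · rw [if_pos hend, if_neg (by rw [hend]; simp)]
              exact IH1 _ _ _ _ (by omega) (by omega)
            · rw [if_neg hend, if_pos (by rw [Bool.not_eq_true] at hend; rw [hend]; rfl)]
              exact IH3 _ _ _ _ _ (by omega) (by omega) (by omega)
          · have hcm2 : ¬ PySem.Str.startswith (PySem.Str.lstrip (PySem.List.pyGetD lines i "")) "/**" = true :=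
              fun hc => hcm (pvsw_star _ hc)
            rw [if_neg (fun hc => Or.elim hc hcm2 hcm)]
            by_cases hob : 0 < pvA_ob (PySem.List.pyGetD lines i "")
            · have hk := pvB_kind3 _ hbr hpass hcm (by simpa [pvA_ob] using hob)
              have hk0 : ¬ (pvB_classify (PySem.List.pyGetD lines i "")).kind = 0 := by omega
              have hk1 : ¬ (pvB_classify (PySem.List.pyGetD lines i "")).kind = 1 := by omega
              have hk2 : ¬ (pvB_classify (PySem.List.pyGetD lines i "")).kind = 2 := by omega
              rw [if_pos hob, if_neg hk0, if_neg hk1, if_neg hk2, if_pos hk]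
              by_cases hdpos : 0 < pvA_ob (PySem.List.pyGetD lines i "") - pvA_cb (PySem.List.pyGetD lines i "")
              · rw [if_pos hdpos]
                exact IH4 _ _ _ _ _ hdpos (by omega) (by omega) (by omega)
              · rw [if_neg hdpos]
                rw [pvA_skipBody_stop lines nA (i + 1) _ (by omega)]
                exact IH1 _ _ _ _ (by omega) (by omega)
            · have hk := pvB_kind4 _ hbr hpass hcm (by simpa [pvA_ob] using hob)
              have hk0 : ¬ (pvB_classify (PySem.List.pyGetD lines i "")).kind = 0 := by omega
              have hk1 : ¬ (pvB_classify (PySem.List.pyGetD lines i "")).kind = 1 := by omega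
              have hk2 : ¬ (pvB_classify (PySem.List.pyGetD lines i "")).kind = 2 := by omega
              have hk3 : ¬ (pvB_classify (PySem.List.pyGetD lines i "")).kind = 3 := by omega
              rw [if_neg hob, if_neg hk0, if_neg hk1, if_neg hk2, if_neg hk3]
              exact IH1 _ _ _ _ (by omega) (by omega)
    · -- nested block (depth >= 2) vs mode 2
      obtain ⟨nA, rfl⟩ : ∃ m, nA = m + 1 := ⟨nA - 1, by omega⟩
      obtain ⟨nB, rfl⟩ : ∃ m, nB = m + 1 := ⟨nB - 1, by omega⟩
      simp only [pvA_go, pvB_run, List.length_map, pvB_get, pvB_delta_eq, pvB_hasEnd_eq,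
        pvB_holder_eq, pvB_line_eq]
      rw [if_pos (show i < (lines.length : Int) ∧ 0 < depth from ⟨hlt, by omega⟩), if_pos hlt]
      rw [if_neg (by exact fun hc => absurd hc.1 (by omega)), if_neg (by omega : ¬ depth = 1)]
      rw [if_neg (by norm_num : ¬ (2 : Int) = 1)]
      simp only [if_true]
      rw [(by ring : depth + pvA_ob (PySem.List.pyGetD lines i "") - pvA_cb (PySem.List.pyGetD lines i "")
            = depth + (pvA_ob (PySem.List.pyGetD lines i "") - pvA_cb (PySem.List.pyGetD lines i "")))]
      by_cases hz : depth + (pvA_ob (PySem.List.pyGetD lines i "") - pvA_cb (PySem.List.pyGetD lines i "")) ≤ 0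
      · rw [if_pos hz, pvA_go_of_nonpos lines _ _ _ _ (by omega)]
      · rw [if_neg hz]
        by_cases h1 : depth + (pvA_ob (PySem.List.pyGetD lines i "") - pvA_cb (PySem.List.pyGetD lines i "")) = 1
        · rw [if_pos h1, h1]; exact IH1 _ _ _ _ (by omega) (by omega)
        · rw [if_neg h1]; exact IH2 _ _ _ _ (by omega) (by omega) (by omega)
    · -- block comment vs mode 3
      obtain ⟨nC, rfl⟩ : ∃ m, nC = m + 1 := ⟨nC - 1, by omega⟩
      obtain ⟨nB, rfl⟩ : ∃ m, nB = m + 1 := ⟨nB - 1, by omega⟩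
      simp only [pvA_comment, pvB_run, List.length_map, pvB_get, pvB_hasEnd_eq, pvB_line_eq]
      rw [if_pos hlt, if_pos hlt]
      rw [if_neg (by norm_num : ¬ (3 : Int) = 1), if_neg (by norm_num : ¬ (3 : Int) = 2)]
      simp only [if_true]
      by_cases hend : PySem.Str.isIn "*/" (PySem.List.pyGetD lines i "") = true
      · rw [if_pos hend, if_pos hend]; exact IH1 _ _ _ _ (by omega) (by omega)
      · rw [if_neg hend, if_neg hend]; exact IH3 _ _ _ _ _ (by omega) (by omega) (by omega)
    · -- method-body skip vs mode 1
      obtain ⟨nS, rfl⟩ : ∃ m, nS = m + 1 := ⟨nS - 1, by omega⟩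
      obtain ⟨nB, rfl⟩ : ∃ m, nB = m + 1 := ⟨nB - 1, by omega⟩
      simp only [pvA_skipBody, pvB_run, List.length_map, pvB_get, pvB_delta_eq]
      rw [if_pos (show i < (lines.length : Int) ∧ 0 < d from ⟨hlt, hd⟩), if_pos hlt]
      simp only [if_true]
      rw [(by ring : d + pvA_ob (PySem.List.pyGetD lines i "") - pvA_cb (PySem.List.pyGetD lines i "")
            = d + (pvA_ob (PySem.List.pyGetD lines i "") - pvA_cb (PySem.List.pyGetD lines i "")))]
      by_cases hz : d + (pvA_ob (PySem.List.pyGetD lines i "") - pvA_cb (PySem.List.pyGetD lines i "")) ≤ 0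
      · rw [if_pos hz]
        rw [pvA_skipBody_stop lines nS (i + 1) _ (by omega)]
        exact IH1 _ _ _ _ (by omega) (by omega)
      · rw [if_neg hz]; exact IH4 _ _ _ _ _ (by omega) (by omega) (by omega) (by omega)

-- ===== VERDICT (by name: the statement is the Claim_ definition above) =====
theorem extract_member_signatures_py_spec : Claim_equal_extract_member_signatures_py := by
  intro lines start result language _ _
  unfold Spec_extract_member_signatures_py extract_member_signatures_py extract_member_signatures_py_alt
  rcases Int.lt_or_le start (lines.length : Int) with h | h
  · exact (pvMain lines ((lines.length : Int) - start).toNat start (by omega) result).1 _ _ 0 (by omega) (by omega)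
  · exact (pvMain lines 0 start (by omega) result).1 _ _ 0 (by omega) (by omega)
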